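-- pv_equiv track=rewrite | github.com/roselinepli/CS61A-Fall-2022 | lab/2022/lab4.py | double_eights
-- ===== SOURCE A (Python) =====
-- def double_eights(n):
--     """Return whether or not n has two digits in row that
--     are the number 8. Assume n has at least two digits in it.
--
--     >>> double_eights(1288)
--     True
--     >>> double_eights(880)
--     True
--     >>> double_eights(2834682)
--     False
--     >>> double_eights(78)
--     False
--     """
--     last, second_last = n % 10, n//10 % 10
--     if last == 8 and second_last == 8:
--         return True
--     elif n < 100:
--         return False
--     return double_eights(n // 10)
--
--     # Alternate solution
--     last, second_last = n % 10, n//10 % 10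
--     if n < 10:
--         return False
--     return (last == 8 and second_last == 8) or double_eights(n//10)
-- ===== SOURCE B (Python) =====
-- def double_eights(n):
--     suffixes = []
--     while True:
--         suffixes.append(n % 100)
--         if n < 100:
--             break
--         n //= 10
--     return 88 in suffixes
-- ===== Notes on version B (the rewrite author's own statement) =====
-- stated objective: alternative
-- what changed: Two staged passes replace A's early-return recursion: first collect n % 100 at every right shift into a list, then test membership of 88 in that list.
import Mathlib
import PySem

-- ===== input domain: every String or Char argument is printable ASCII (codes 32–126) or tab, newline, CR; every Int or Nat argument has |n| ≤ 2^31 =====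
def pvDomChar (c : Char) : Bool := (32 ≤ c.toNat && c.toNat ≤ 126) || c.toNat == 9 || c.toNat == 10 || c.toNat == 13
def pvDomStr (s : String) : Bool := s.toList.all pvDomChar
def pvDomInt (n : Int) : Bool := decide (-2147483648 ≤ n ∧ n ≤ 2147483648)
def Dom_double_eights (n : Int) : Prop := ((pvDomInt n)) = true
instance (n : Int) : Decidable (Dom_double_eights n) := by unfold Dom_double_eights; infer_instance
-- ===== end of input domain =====

-- B is an alternative decomposition: it first collects n % 100 at every right shift into a list, then searches that list for 88, instead of A's early-return recursion; same cost.


-- ===== PORT A =====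
def double_eights (n : Int) : Bool :=
  let last := PySem.Int.mod n 10
  let second_last := PySem.Int.mod (PySem.Int.floordiv n 10) 10
  if last = 8 ∧ second_last = 8 then true
  else if n < 100 then false
  else double_eights (PySem.Int.floordiv n 10)
termination_by n.toNat
decreasing_by
  rw [PySem.Int.floordiv_eq_ediv_of_pos (by norm_num : (0:Int) < 10)]
  omega

-- ===== PORT B =====
-- B's first pass: the `while True` loop appending n % 100 at each shift.
def pvSuffixes (n : Int) : List Int :=
  PySem.Int.mod n 100 ::
    (if n < 100 then [] else pvSuffixes (PySem.Int.floordiv n 10))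
termination_by n.toNat
decreasing_by
  rw [PySem.Int.floordiv_eq_ediv_of_pos (by norm_num : (0:Int) < 10)]
  omega

-- B's second pass: `88 in suffixes`.
def double_eights_alt (n : Int) : Bool := (pvSuffixes n).contains 88

-- ===== PRECONDITION & SPEC =====
def Spec_double_eights (n : Int) (out : Bool) : Prop := out = double_eights_alt n
instance (n : Int) (out : Bool) : Decidable (Spec_double_eights n out) := by unfold Spec_double_eights; infer_instance

-- ===== CLAIM (what is proved, stated in full; the proofs are below) =====
def Claim_equal_double_eights : Prop := ∀ (n : Int), Dom_double_eights n → Spec_double_eights n (double_eights n)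

-- ===== LEMMAS AND PROOFS =====

-- A's pair of digit tests coincides with `n % 100 = 88`.
theorem pair_iff_mod100 (n : Int) :
    (PySem.Int.mod n 10 = 8 ∧ PySem.Int.mod (PySem.Int.floordiv n 10) 10 = 8) ↔
      PySem.Int.mod n 100 = 88 := by
  rw [PySem.Int.floordiv_eq_ediv_of_pos (by norm_num : (0:Int) < 10),
      PySem.Int.mod_eq_emod_of_pos (a := n) (by norm_num : (0:Int) < 10),
      PySem.Int.mod_eq_emod_of_pos (by norm_num : (0:Int) < 10),
      PySem.Int.mod_eq_emod_of_pos (by norm_num : (0:Int) < 100)]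
  omega

theorem de_eq (n : Int) : double_eights n = double_eights_alt n := by
  fun_induction double_eights n with
  | case1 n _ _ h =>
      have hm := (pair_iff_mod100 n).mp h
      rw [PySem.Int.mod_eq_emod_of_pos (by norm_num : (0:Int) < 100)] at hm
      unfold double_eights_alt
      rw [pvSuffixes]
      simp [hm]
  | case2 n _ _ h hlt =>
      have hm : ¬ (PySem.Int.mod n 100 = 88) := fun hm => h ((pair_iff_mod100 n).mpr hm)
      rw [PySem.Int.mod_eq_emod_of_pos (by norm_num : (0:Int) < 100)] at hm
      unfold double_eights_alt
      rw [pvSuffixes, if_pos hlt]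
      simp [Ne.symm hm]
  | case3 n _ _ h hlt ih =>
      have hm : ¬ (PySem.Int.mod n 100 = 88) := fun hm => h ((pair_iff_mod100 n).mpr hm)
      rw [PySem.Int.mod_eq_emod_of_pos (by norm_num : (0:Int) < 100)] at hm
      rw [PySem.Int.floordiv_eq_ediv_of_pos (by norm_num : (0:Int) < 10)] at ih
      unfold double_eights_alt at ih ⊢
      rw [pvSuffixes, if_neg hlt]
      simp [Ne.symm hm]
      simpa using ih

-- ===== VERDICT (by name: the statement is the Claim_ definition above) =====
theorem double_eights_spec : Claim_equal_double_eights := by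
  intro n _
  unfold Spec_double_eights
  exact de_eq n
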